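-- pv_equiv track=rewrite | github.com/NoHaxUS/rochasistemas | bet_bola/updater/get_markets.py | get_translated_cotation_with_opp_standard
-- ===== SOURCE A (Python) =====
-- def get_translated_cotation_with_opp_standard(cotation_name):
--     TRANSLATE_TABLE = {
--         '1':'Casa',
--         '2': 'Fora',
--         'X':'Empate',
--     }
--     cotation_translated = cotation_name
--     for header in TRANSLATE_TABLE.keys():
--         cotation_translated = cotation_translated.replace(header, TRANSLATE_TABLE.get(header, header))
--     return cotation_translated
-- ===== SOURCE B (Python) =====
-- def get_translated_cotation_with_opp_standard(cotation_name):
--     TRANSLATE_TABLE = {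
--         '1': 'Casa',
--         '2': 'Fora',
--         'X': 'Empate',
--     }
--     return ''.join(TRANSLATE_TABLE.get(ch, ch) for ch in cotation_name)
-- ===== Notes on version B (the rewrite author's own statement) =====
-- stated objective: idiomatic
-- what changed: B makes a single pass over the characters, emitting the table translation (or the character itself) for each and joining, instead of A's three successive full-string replace scans, one per table key.
import Mathlib
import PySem

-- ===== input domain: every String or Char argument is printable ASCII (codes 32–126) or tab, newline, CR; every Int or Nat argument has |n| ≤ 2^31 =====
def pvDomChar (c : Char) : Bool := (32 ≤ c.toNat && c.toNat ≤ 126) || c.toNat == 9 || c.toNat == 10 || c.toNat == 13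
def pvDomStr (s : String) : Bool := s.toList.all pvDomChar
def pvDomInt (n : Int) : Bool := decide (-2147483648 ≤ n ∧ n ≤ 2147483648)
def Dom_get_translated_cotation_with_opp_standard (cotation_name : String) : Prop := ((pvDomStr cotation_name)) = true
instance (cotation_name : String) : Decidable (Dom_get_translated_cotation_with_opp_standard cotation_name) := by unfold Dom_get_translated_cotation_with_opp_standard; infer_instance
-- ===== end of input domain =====

-- B replaces A's three successive full-string .replace scans by one pass over the
-- characters that emits the table translation of each character (objective: idiomatic).

-- ===== PORT A =====
-- the dict literal TRANSLATE_TABLE (same in A and B)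
def pvTranslateTable : PySem.Dict String String :=
  PySem.Dict.ofList [("1", "Casa"), ("2", "Fora"), ("X", "Empate")]

def get_translated_cotation_with_opp_standard (cotation_name : String) : String :=
  -- for header in TRANSLATE_TABLE.keys(): cotation_translated = cotation_translated.replace(header, TRANSLATE_TABLE.get(header, header))
  pvTranslateTable.keys.foldl
    (fun cotation_translated header =>
      PySem.Str.replace cotation_translated header (pvTranslateTable.getD header header))
    cotation_name

-- ===== PORT B =====
def get_translated_cotation_with_opp_standard_alt (cotation_name : String) : String :=
  -- ''.join(TRANSLATE_TABLE.get(ch, ch) for ch in cotation_name)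
  PySem.Str.join ""
    (cotation_name.toList.map
      (fun ch => pvTranslateTable.getD (String.ofList [ch]) (String.ofList [ch])))

-- ===== PRECONDITION & SPEC =====
def Spec_get_translated_cotation_with_opp_standard (cotation_name : String) (out : String) : Prop := out = get_translated_cotation_with_opp_standard_alt cotation_name
instance (cotation_name : String) (out : String) : Decidable (Spec_get_translated_cotation_with_opp_standard cotation_name out) := by unfold Spec_get_translated_cotation_with_opp_standard; infer_instance

-- ===== CLAIM (what is proved, stated in full; the proofs are below) =====
def Claim_equal_get_translated_cotation_with_opp_standard : Prop := ∀ (cotation_name : String), Dom_get_translated_cotation_with_opp_standard cotation_name → Spec_get_translated_cotation_with_opp_standard cotation_name (get_translated_cotation_with_opp_standard cotation_name)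

-- ===== LEMMAS AND PROOFS =====

theorem pv_go_single (a : Char) (new : List Char) :
    ∀ (fuel : Nat) (l acc : List Char), l.length ≤ fuel →
      PySem.Chars.replace.go [a] new fuel l acc
        = acc.reverse ++ l.flatMap (fun c => if c = a then new else [c]) := by
  intro fuel
  induction fuel with
  | zero => intro l acc h; cases l with
    | nil => simp [PySem.Chars.replace.go]
    | cons c t => simp at h
  | succ n ih =>
    intro l acc h
    cases l with
    | nil => simp [PySem.Chars.replace.go]
    | cons c t =>
      by_cases hc : c = a
      · subst hc
        have hpre : List.isPrefixOf [c] (c :: t) = true := by simp [List.isPrefixOf]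
        simp only [PySem.Chars.replace.go, hpre, if_true, List.length_cons,
          List.length_nil, List.drop_succ_cons, List.drop_zero]
        rw [ih t (new.reverse ++ acc) (by simpa using Nat.le_of_succ_le_succ h)]
        simp
      · have hpre : List.isPrefixOf [a] (c :: t) = false := by
          simp [List.isPrefixOf]
          intro h'; exact absurd h'.symm hc
        simp only [PySem.Chars.replace.go, hpre]
        rw [ih t (c :: acc) (by simpa using Nat.le_of_succ_le_succ h)]
        simp [hc]

-- replace with a single-character pattern is a per-character flatMap
theorem pv_replace_single (cs : List Char) (a : Char) (new : List Char) :
    PySem.Chars.replace cs [a] new = cs.flatMap (fun c => if c = a then new else [c]) := by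
  rw [PySem.Chars.replace]
  simp [pv_go_single a new cs.length cs [] le_rfl]

theorem pv_key_ne (a c : Char) (h1 : a ≠ c) :
    (String.ofList [a] == String.ofList [c]) = false := by
  simp only [beq_eq_false_iff_ne, ne_eq, String.ext_iff, String.toList_ofList]
  simp [h1]

theorem pv_tbl_items :
    pvTranslateTable.items = [("1", "Casa"), ("2", "Fora"), ("X", "Empate")] := by rfl

theorem pv_getD_other (c : Char) (h1 : c ≠ '1') (h2 : c ≠ '2') (h3 : c ≠ 'X') :
    pvTranslateTable.getD (String.ofList [c]) (String.ofList [c]) = String.ofList [c] := by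
  have e1 := pv_key_ne '1' c (Ne.symm h1)
  have e2 := pv_key_ne '2' c (Ne.symm h2)
  have e3 := pv_key_ne 'X' c (Ne.symm h3)
  simp only [PySem.Dict.getD, PySem.Dict.get?, pv_tbl_items]
  simp [show ("1" : String) = String.ofList ['1'] from rfl,
        show ("2" : String) = String.ofList ['2'] from rfl,
        show ("X" : String) = String.ofList ['X'] from rfl, List.find?, e1, e2, e3]

theorem pv_intercalate_nil_eq_flatten (l : List (List Char)) :
    List.intercalate [] l = l.flatten := by
  induction l with
  | nil => rfl
  | cons x xs ih => cases xs with
    | nil => simp [List.intercalate]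
    | cons y ys =>
      simp only [List.intercalate] at ih ⊢
      simp [List.intersperse] at ih ⊢
      exact ih

theorem pv_join_nil_toList (parts : List String) :
    (PySem.Str.join "" parts).toList = (parts.map String.toList).flatten := by
  simp [PySem.Str.join, PySem.Chars.join, pv_intercalate_nil_eq_flatten]

-- the three sequential per-character flatMaps equal the one-pass table lookup
theorem pv_chain (cs : List Char) :
    ((cs.flatMap (fun c => if c = '1' then "Casa".toList else [c])).flatMap
        (fun c => if c = '2' then "Fora".toList else [c])).flatMap
        (fun c => if c = 'X' then "Empate".toList else [c])
      = cs.flatMap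
          (fun c => (pvTranslateTable.getD (String.ofList [c]) (String.ofList [c])).toList) := by
  induction cs with
  | nil => rfl
  | cons c t ih =>
    simp only [List.flatMap_cons, List.flatMap_append]
    rw [ih]
    congr 1
    by_cases h1 : c = '1'
    · subst h1; decide
    by_cases h2 : c = '2'
    · subst h2; decide
    by_cases h3 : c = 'X'
    · subst h3; decide
    simp [h1, h2, h3, pv_getD_other c h1 h2 h3]

theorem pv_A_eq (s : String) :
    get_translated_cotation_with_opp_standard s
      = PySem.Str.replace (PySem.Str.replace (PySem.Str.replace s "1" "Casa") "2" "Fora")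
          "X" "Empate" := rfl

-- ===== VERDICT (by name: the statement is the Claim_ definition above) =====
theorem get_translated_cotation_with_opp_standard_spec : Claim_equal_get_translated_cotation_with_opp_standard := by
  intro s _
  unfold Spec_get_translated_cotation_with_opp_standard
  have hA : (get_translated_cotation_with_opp_standard s).toList
      = ((s.toList.flatMap (fun c => if c = '1' then "Casa".toList else [c])).flatMap
            (fun c => if c = '2' then "Fora".toList else [c])).flatMap
            (fun c => if c = 'X' then "Empate".toList else [c]) := by
    rw [pv_A_eq]
    simp only [PySem.Str.toList_replace]
    rw [show ("1" : String).toList = ['1'] from rfl, pv_replace_single,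
        show ("2" : String).toList = ['2'] from rfl, pv_replace_single,
        show ("X" : String).toList = ['X'] from rfl, pv_replace_single]
  have hB : (get_translated_cotation_with_opp_standard_alt s).toList
      = s.toList.flatMap
          (fun c => (pvTranslateTable.getD (String.ofList [c]) (String.ofList [c])).toList) := by
    unfold get_translated_cotation_with_opp_standard_alt
    rw [pv_join_nil_toList]
    simp [List.flatMap_def, Function.comp_def]
  apply String.ext
  rw [hA, hB, pv_chain]
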